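-- pv_equiv track=rewrite | github.com/AP-MI-2021/lab-4-andrei1426 | main.py | poz_crescatore
-- ===== SOURCE A (Python) =====
-- def poz_crescatore(l):
--     """
--         verifica daca toate nr pozititve din lista se afla in ordine crescatoare
--     :param l: lista verificate
--     :return: bool: daca toate nr pozititve din lista se afla in ordine crescatoare, false contrar
--     """
--     ultim=-1
--     for x in l:
--         if x>0:
--             if  x <ultim:
--                 return False
--             else:
--                 ultim = x
--     return True
-- ===== SOURCE B (Python) =====
-- def poz_crescatore(l):
--     pos = [x for x in l if x > 0]
--     return pos == sorted(pos)
-- ===== Notes on version B (the rewrite author's own statement) =====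
-- stated objective: simpler
-- what changed: Replaces the single-pass scan with a running last-positive value by extracting the positive sublist and comparing it to its sorted copy.
import Mathlib
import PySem

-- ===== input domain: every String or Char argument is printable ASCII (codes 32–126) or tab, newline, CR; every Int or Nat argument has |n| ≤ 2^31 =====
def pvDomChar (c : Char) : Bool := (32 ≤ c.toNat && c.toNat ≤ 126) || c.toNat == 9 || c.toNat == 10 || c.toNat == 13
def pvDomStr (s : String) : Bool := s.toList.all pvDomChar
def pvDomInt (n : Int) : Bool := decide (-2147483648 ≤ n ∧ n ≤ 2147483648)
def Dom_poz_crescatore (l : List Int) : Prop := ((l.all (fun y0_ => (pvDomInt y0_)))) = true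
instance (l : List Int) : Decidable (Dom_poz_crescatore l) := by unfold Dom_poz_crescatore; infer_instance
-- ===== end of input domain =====

-- B is the sort-and-compare strategy over the extracted positive sublist: simpler, not faster.

-- ===== PORT A =====
-- the 'for x in l' loop with running 'ultim' and early 'return False'
def pozAux : List Int → Int → Bool
  | [], _ => true
  | x :: xs, ultim =>
    if x > 0 then
      if x < ultim then false else pozAux xs x
    else
      pozAux xs ultim

def poz_crescatore (l : List Int) : Bool := pozAux l (-1)

-- ===== PORT B =====
def poz_crescatore_alt (l : List Int) : Bool :=
  let pos := l.filter (fun x => decide (x > 0))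
  pos == PySem.List.sorted pos (fun x => x) false

-- ===== PRECONDITION & SPEC =====
def Spec_poz_crescatore (l : List Int) (out : Bool) : Prop := out = poz_crescatore_alt l
instance (l : List Int) (out : Bool) : Decidable (Spec_poz_crescatore l out) := by unfold Spec_poz_crescatore; infer_instance

-- ===== CLAIM (what is proved, stated in full; the proofs are below) =====
def Claim_equal_poz_crescatore : Prop := ∀ (l : List Int), Dom_poz_crescatore l → Spec_poz_crescatore l (poz_crescatore l)

-- ===== LEMMAS AND PROOFS =====

-- A's loop decides Chain' (≤) over 'ultim' followed by the positives of the rest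
theorem pozAux_eq_chain (xs : List Int) (u : Int) :
    pozAux xs u = decide (List.IsChain (· ≤ ·) (u :: xs.filter (fun x => decide (x > 0)))) := by
  induction xs generalizing u with
  | nil => simp [pozAux]
  | cons x xs ih =>
    by_cases hx : x > 0
    · rw [show pozAux (x :: xs) u = if x < u then false else pozAux xs x by
        simp [pozAux, hx]]
      simp only [List.filter_cons, hx, decide_true, if_pos]
      by_cases hlt : x < u
      · rw [if_pos hlt]
        simp [List.isChain_cons_cons]; omega
      · rw [if_neg hlt, ih]
        simp only [List.isChain_cons_cons, decide_eq_decide]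
        constructor
        · intro h; exact ⟨by omega, h⟩
        · intro h; exact h.2
    · simp only [pozAux, List.filter_cons, hx, decide_false]
      simpa using ih u

-- B decides Pairwise (≤) over the positives
theorem alt_eq_pairwise (l : List Int) :
    poz_crescatore_alt l
      = decide ((l.filter (fun x => decide (x > 0))).Pairwise (· ≤ ·)) := by
  unfold poz_crescatore_alt
  set pos := l.filter (fun x => decide (x > 0)) with hpos
  by_cases hp : pos.Pairwise (· ≤ ·)
  · have : PySem.List.sorted pos (fun x => x) false = pos :=
      PySem.List.sorted_eq_self_of_pairwise pos (fun x => x) (by simpa using hp)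
    simp [this, hp]
  · simp only [hp, decide_false, beq_eq_false_iff_ne, ne_eq]
    intro heq
    exact hp (by simpa using heq ▸ PySem.List.sorted_pairwise pos (fun x => x))

-- ===== VERDICT (by name: the statement is the Claim_ definition above) =====
theorem poz_crescatore_spec : Claim_equal_poz_crescatore := by
  intro l _
  unfold Spec_poz_crescatore poz_crescatore
  rw [pozAux_eq_chain, alt_eq_pairwise]
  congr 1
  rw [List.isChain_cons, eq_iff_iff]
  constructor
  · rintro ⟨-, hc⟩
    exact List.isChain_iff_pairwise.mp hc
  · intro hp
    refine ⟨?_, List.isChain_iff_pairwise.mpr hp⟩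
    intro y hy
    have : y > 0 := by
      have := List.mem_filter.mp (List.mem_of_mem_head? hy)
      simpa using this.2
    omega
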